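-- pv_equiv track=rewrite | github.com/WenyuLai2024/parkinson-tracker | clinical_utils.py | strip_internal_tags
-- ===== SOURCE A (Python) =====
-- def strip_internal_tags(text):
--     if not text:
--         return ""
--     earliest_tag_pos = len(text)
--     for tag in ("[SUMMARY]", "[PROFILE]", "[HAUSER]", "[MOCA]"):
--         pos = text.find(tag)
--         if pos != -1 and pos < earliest_tag_pos:
--             earliest_tag_pos = pos
--     return text[:earliest_tag_pos].strip()
-- ===== SOURCE B (Python) =====
-- def strip_internal_tags(text):
--     if not text:
--         return ""
--     tags = ("[SUMMARY]", "[PROFILE]", "[HAUSER]", "[MOCA]")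
--     cut = len(text)
--     for i in range(len(text)):
--         if any(text.startswith(t, i) for t in tags):
--             cut = i
--             break
--     return text[:cut].strip()
-- ===== Notes on version B (the rewrite author's own statement) =====
-- stated objective: alternative
-- what changed: Replaces the four full find() passes plus running-minimum bookkeeping with a single left-to-right scan that stops at the first position where any tag starts.
import Mathlib
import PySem

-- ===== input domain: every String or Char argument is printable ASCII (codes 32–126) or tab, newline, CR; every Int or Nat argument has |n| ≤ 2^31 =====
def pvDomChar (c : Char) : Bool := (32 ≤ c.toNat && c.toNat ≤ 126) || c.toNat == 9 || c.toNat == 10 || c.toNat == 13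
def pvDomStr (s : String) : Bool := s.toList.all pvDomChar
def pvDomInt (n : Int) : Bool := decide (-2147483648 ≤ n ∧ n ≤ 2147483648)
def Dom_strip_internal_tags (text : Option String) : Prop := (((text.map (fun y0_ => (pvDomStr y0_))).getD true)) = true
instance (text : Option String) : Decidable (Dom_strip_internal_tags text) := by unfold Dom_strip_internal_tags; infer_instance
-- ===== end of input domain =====

-- B replaces A's four full find() passes plus running-minimum bookkeeping with one
-- left-to-right scan that stops at the first position where any tag starts (alternative).

-- ===== PORT A =====
-- A: for each of the four tags, find() its first occurrence; keep the minimum; slice, strip.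
def strip_internal_tags (text : Option String) : String :=
  match text with
  | none => ""
  | some s =>
    if s.toList = [] then ""  -- 'if not text' (None handled by the match above)
    else
      let e := (["[SUMMARY]", "[PROFILE]", "[HAUSER]", "[MOCA]"] : List String).foldl
        (fun acc tag =>
          let pos := PySem.Str.find s tag
          if pos ≠ -1 ∧ pos < acc then pos else acc)
        (PySem.Str.len s)
      PySem.Str.strip (PySem.Str.slice s none (some e))

-- ===== PORT B =====
-- B: scan indices left to right; 'any(text.startswith(t, i) for t in tags)' is a prefix
-- test on the suffix starting at i; stop at the first hit, else cut = len(text).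
def pvScan (tags : List (List Char)) (i : Nat) (ds : List Char) : Option Nat :=
  match ds with
  | [] => none
  | c :: rest =>
    if tags.any (fun t => t.isPrefixOf (c :: rest)) then some i
    else pvScan tags (i + 1) rest

def strip_internal_tags_alt (text : Option String) : String :=
  match text with
  | none => ""
  | some s =>
    if s.toList = [] then ""  -- 'if not text'
    else
      let tags : List (List Char) :=
        ["[SUMMARY]".toList, "[PROFILE]".toList, "[HAUSER]".toList, "[MOCA]".toList]
      let cut : Nat := (pvScan tags 0 s.toList).getD s.toList.length
      PySem.Str.strip (PySem.Str.slice s none (some (cut : Int)))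

-- ===== PRECONDITION & SPEC =====
def Spec_strip_internal_tags (text : Option String) (out : String) : Prop := out = strip_internal_tags_alt text
instance (text : Option String) (out : String) : Decidable (Spec_strip_internal_tags text out) := by unfold Spec_strip_internal_tags; infer_instance

-- ===== CLAIM (what is proved, stated in full; the proofs are below) =====
def Claim_equal_strip_internal_tags : Prop := ∀ (text : Option String), Dom_strip_internal_tags text → Spec_strip_internal_tags text (strip_internal_tags text)

-- ===== LEMMAS AND PROOFS =====

-- the four tags, in both ports' shapes
def pvTagsA : List String := ["[SUMMARY]", "[PROFILE]", "[HAUSER]", "[MOCA]"]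
def pvTagsB : List (List Char) :=
  ["[SUMMARY]".toList, "[PROFILE]".toList, "[HAUSER]".toList, "[MOCA]".toList]

-- B's hit test at position k equals "some tag of A is a prefix of the suffix at k"
lemma pvHit_iff (cs : List Char) (k : Nat) :
    (pvTagsB.any (fun t => t.isPrefixOf (cs.drop k)) = true)
    ↔ ∃ t ∈ pvTagsA, t.toList <+: cs.drop k := by
  simp [pvTagsA, pvTagsB, List.any_cons, List.isPrefixOf_iff_prefix]

lemma pvTagsA_ne_nil : ∀ t ∈ pvTagsA, t.toList ≠ [] := by decide

lemma pvScan_none_spec (tags : List (List Char)) :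
    ∀ (ds : List Char) (i : Nat), pvScan tags i ds = none →
      ∀ k : Nat, k < ds.length → tags.any (fun t => t.isPrefixOf (ds.drop k)) = false := by
  intro ds
  induction ds with
  | nil => intro i _ k hk; simp at hk
  | cons c rest ih =>
    intro i h k hk
    by_cases hc : tags.any (fun t => t.isPrefixOf (c :: rest)) = true
    · simp [pvScan, hc] at h
    · match k with
      | 0 => simpa using eq_false_of_ne_true hc
      | k + 1 =>
        have h' : pvScan tags (i + 1) rest = none := by
          simpa [pvScan, hc] using h
        simpa using ih (i + 1) h' k (by simpa using hk)

lemma pvScan_some_spec (tags : List (List Char)) :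
    ∀ (ds : List Char) (i j : Nat), pvScan tags i ds = some j →
      i ≤ j ∧ j - i < ds.length ∧
      tags.any (fun t => t.isPrefixOf (ds.drop (j - i))) = true ∧
      ∀ k : Nat, k < j - i → tags.any (fun t => t.isPrefixOf (ds.drop k)) = false := by
  intro ds
  induction ds with
  | nil => intro i j h; simp [pvScan] at h
  | cons c rest ih =>
    intro i j h
    by_cases hc : tags.any (fun t => t.isPrefixOf (c :: rest)) = true
    · have hj : j = i := by simpa [pvScan, hc] using h.symm
      subst hj
      refine ⟨le_refl _, by simp, by simpa using hc, ?_⟩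
      intro k hk; omega
    · have h' : pvScan tags (i + 1) rest = some j := by
        simpa [pvScan, hc] using h
      obtain ⟨h1, h2, h3, h4⟩ := ih (i + 1) j h'
      refine ⟨by omega, by simp; omega, ?_, ?_⟩
      · have : (c :: rest).drop (j - i) = rest.drop (j - (i + 1)) := by
          have : j - i = (j - (i + 1)) + 1 := by omega
          rw [this, List.drop_succ_cons]
        rw [this]; exact h3
      · intro k hk
        match k with
        | 0 => simpa using eq_false_of_ne_true hc
        | k + 1 =>
          rw [List.drop_succ_cons]
          exact h4 k (by omega)

-- A's running-minimum fold: 0 ≤ r ≤ acc, no tag of T occurs strictly below r, and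
-- r is acc or the position of an occurrence of some tag of T.
lemma foldA_spec (s : String) :
    ∀ (T : List String) (acc : Int), 0 ≤ acc →
      (0 ≤ T.foldl (fun acc tag =>
          let pos := PySem.Str.find s tag
          if pos ≠ -1 ∧ pos < acc then pos else acc) acc) ∧
      (T.foldl (fun acc tag =>
          let pos := PySem.Str.find s tag
          if pos ≠ -1 ∧ pos < acc then pos else acc) acc) ≤ acc ∧
      (∀ t ∈ T, ∀ i : Nat, (i : Int) < (T.foldl (fun acc tag =>
          let pos := PySem.Str.find s tag
          if pos ≠ -1 ∧ pos < acc then pos else acc) acc) → ¬ t.toList <+: s.toList.drop i) ∧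
      ((T.foldl (fun acc tag =>
          let pos := PySem.Str.find s tag
          if pos ≠ -1 ∧ pos < acc then pos else acc) acc) = acc ∨
        ∃ t ∈ T, t.toList <+: s.toList.drop ((T.foldl (fun acc tag =>
          let pos := PySem.Str.find s tag
          if pos ≠ -1 ∧ pos < acc then pos else acc) acc)).toNat) := by
  intro T
  induction T with
  | nil => intro acc h0; simp [h0]
  | cons t T ih =>
    intro acc h0
    simp only [List.foldl_cons]
    set f := PySem.Str.find s t with hf
    have hfind : f = PySem.Chars.find s.toList t.toList := by
      simp [hf, PySem.Str.find_eq]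
    set acc' : Int := (if f ≠ -1 ∧ f < acc then f else acc) with hacc'
    have h0' : 0 ≤ acc' := by
      by_cases hc : f ≠ -1 ∧ f < acc
      · have := PySem.Chars.neg_one_le_find s.toList t.toList
        rw [hacc', if_pos hc]; rw [hfind] at *; omega
      · rw [hacc', if_neg hc]; exact h0
    have hle' : acc' ≤ acc := by
      by_cases hc : f ≠ -1 ∧ f < acc
      · rw [hacc', if_pos hc]; exact le_of_lt hc.2
      · rw [hacc', if_neg hc]
    -- no occurrence of the head tag strictly below acc'
    have hhead : ∀ i : Nat, (i : Int) < acc' → ¬ t.toList <+: s.toList.drop i := by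
      intro i hi hpre
      by_cases hneg : f = -1
      · have : ¬ t.toList <:+: s.toList := (PySem.Chars.find_eq_neg_one_iff _ _).mp (hfind ▸ hneg)
        have : PySem.Chars.isIn t.toList s.toList = true :=
          (PySem.Chars.exists_prefix_drop_iff_isIn _ _).mp ⟨i, hpre⟩
        exact ‹¬ t.toList <:+: s.toList› ((PySem.Chars.isIn_iff_infix _ _).mp this)
      · have hf0 : 0 ≤ PySem.Chars.find s.toList t.toList := by
          have := PySem.Chars.neg_one_le_find s.toList t.toList
          rw [← hfind]; rw [← hfind] at this; omega
        have hspec := PySem.Chars.find_spec hf0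
        have hilt : i < (PySem.Chars.find s.toList t.toList).toNat := by
          by_cases hc : f ≠ -1 ∧ f < acc
          · rw [hacc', if_pos hc] at hi; rw [hfind] at hi; omega
          · have hge : acc ≤ f := by
              rcases not_and_or.mp hc with h | h
              · exact absurd (not_not.mp h) hneg
              · omega
            rw [hacc', if_neg hc] at hi
            omega
        exact hspec.2 i hilt hpre
    obtain ⟨ih0, ihle, ihmin, ihocc⟩ := ih acc' h0'
    refine ⟨ih0, le_trans ihle hle', ?_, ?_⟩
    · intro u hu i hi
      rcases List.mem_cons.mp hu with h | h
      · subst h; exact hhead i (lt_of_lt_of_le hi ihle)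
      · exact ihmin u h i hi
    · rcases ihocc with heq | ⟨u, hu, hpre⟩
      · by_cases hc : f ≠ -1 ∧ f < acc
        · right
          refine ⟨t, List.mem_cons_self, ?_⟩
          have hf0 : 0 ≤ PySem.Chars.find s.toList t.toList := by
            have := PySem.Chars.neg_one_le_find s.toList t.toList
            rw [← hfind]; rw [← hfind] at this
            rcases hc with ⟨h1, _⟩; omega
          have := (PySem.Chars.find_spec hf0).1
          have : t.toList <+: s.toList.drop f.toNat := by rw [hfind]; exact this
          rw [heq, hacc', if_pos hc]; exact this
        · left; rw [heq, hacc', if_neg hc]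
      · exact Or.inr ⟨u, List.mem_cons_of_mem _ hu, hpre⟩

-- ===== VERDICT (by name: the statement is the Claim_ definition above) =====
theorem strip_internal_tags_spec : Claim_equal_strip_internal_tags := by
  unfold Claim_equal_strip_internal_tags Spec_strip_internal_tags
  intro text _
  match text with
  | none => rfl
  | some s =>
    simp only [strip_internal_tags, strip_internal_tags_alt]
    by_cases hs : s.toList = []
    · simp [hs]
    · simp only [if_neg hs]
      have hlen0 : (0 : Int) ≤ PySem.Str.len s := by
        rw [PySem.Str.len_eq]; positivity
      obtain ⟨hA0, hAle, hAmin, hAocc⟩ := foldA_spec s pvTagsA (PySem.Str.len s) hlen0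
      set r := (pvTagsA.foldl (fun acc tag =>
          let pos := PySem.Str.find s tag
          if pos ≠ -1 ∧ pos < acc then pos else acc) (PySem.Str.len s)) with hr
      have hlen : PySem.Str.len s = (s.toList.length : Int) := by rw [PySem.Str.len_eq]
      -- show r = cut
      have hkey : r = (((pvScan pvTagsB 0 s.toList).getD s.toList.length : Nat) : Int) := by
        cases hscan : pvScan pvTagsB 0 s.toList with
        | none =>
          have hnone := pvScan_none_spec pvTagsB s.toList 0 hscan
          have : r = PySem.Str.len s := by
            rcases hAocc with h | ⟨t, ht, hpre⟩
            · exact h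
            · exfalso
              have hlt : r.toNat < s.toList.length := by
                have hne := pvTagsA_ne_nil t ht
                have h1 := List.IsPrefix.length_le hpre
                have h2 : 0 < t.toList.length := List.length_pos_iff.mpr hne
                have h3 : (List.drop r.toNat s.toList).length = s.toList.length - r.toNat := by
                  simp
                omega
              have hfalse := hnone r.toNat hlt
              have htrue := (pvHit_iff s.toList r.toNat).mpr ⟨t, ht, hpre⟩
              simp [hfalse] at htrue
          rw [this, hlen]; simp
        | some j =>
          obtain ⟨_, hjlt, hjocc, hjmin⟩ := pvScan_some_spec pvTagsB s.toList 0 j hscan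
          simp only [Nat.sub_zero] at hjlt hjocc hjmin
          -- r ≤ j
          have hrj : r ≤ (j : Int) := by
            by_contra hlt
            rw [not_le] at hlt
            obtain ⟨t, ht, hpre⟩ := (pvHit_iff s.toList j).mp hjocc
            exact hAmin t ht j hlt hpre
          -- occurrence at r
          have hocc : ∃ t ∈ pvTagsA, t.toList <+: s.toList.drop r.toNat := by
            rcases hAocc with h | h
            · exfalso; rw [h, hlen] at hrj; omega
            · exact h
          have hjr : (j : Int) ≤ r := by
            by_contra hlt
            rw [not_le] at hlt
            have hrn : r.toNat < j := by omega
            have hfalse := hjmin r.toNat hrn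
            have htrue := (pvHit_iff s.toList r.toNat).mpr hocc
            simp [hfalse] at htrue
          simp only [Option.getD_some]
          omega
      rw [show (["[SUMMARY]", "[PROFILE]", "[HAUSER]", "[MOCA]"] : List String) = pvTagsA from rfl,
          show (["[SUMMARY]".toList, "[PROFILE]".toList, "[HAUSER]".toList, "[MOCA]".toList] : List (List Char)) = pvTagsB from rfl]
      rw [← hr, hkey]
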